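-- pv_equiv track=rewrite | github.com/Caprice-Instinct/kiswahili-kwanza | ai-model/src/models/pronunciation_evaluator.py | _word_to_phonemes
-- ===== SOURCE A (Python) =====
-- from typing import Dict, List, Tuple, Optional
--
-- def _word_to_phonemes(word: str) -> List[str]:
--     """
--     Convert Kiswahili word to phonemes
--     Simplified phoneme extraction for common Kiswahili patterns
--     """
--     word = word.lower()
--     phonemes = []
--     i = 0
--
--     while i < len(word):
--         # Check for digraphs first
--         if i < len(word) - 1:
--             digraph = word[i:i+2]
--             if digraph in ['ch', 'ng', 'ny', 'th']:
--                 phonemes.append(digraph)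
--                 i += 2
--                 continue
--
--         # Single phoneme
--         if word[i] in 'aeiou':
--             phonemes.append(word[i])  # vowel
--         elif word[i] in 'bcdfghjklmnpqrstvwxyz':
--             phonemes.append(word[i])  # consonant
--
--         i += 1
--
--     return phonemes
-- ===== SOURCE B (Python) =====
-- import re
--
-- _PHONEME_RE = re.compile(r'ch|ng|ny|th|[a-z]')
--
-- def _word_to_phonemes(word: str):
--     """Tokenise the lowercased word with one regex: digraphs first, then any
--     single letter; non-letters are silently dropped."""
--     return _PHONEME_RE.findall(word.lower())
-- ===== Notes on version B (the rewrite author's own statement) =====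
-- stated objective: idiomatic
-- what changed: Replaced A's explicit index-driven while loop with branch chains by a single regex findall over the lowercased word whose ordered alternation (digraphs 'ch|ng|ny|th' first, then the class [a-z]) performs the tokenisation; non-letters are dropped by the regex itself.
import Mathlib
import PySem

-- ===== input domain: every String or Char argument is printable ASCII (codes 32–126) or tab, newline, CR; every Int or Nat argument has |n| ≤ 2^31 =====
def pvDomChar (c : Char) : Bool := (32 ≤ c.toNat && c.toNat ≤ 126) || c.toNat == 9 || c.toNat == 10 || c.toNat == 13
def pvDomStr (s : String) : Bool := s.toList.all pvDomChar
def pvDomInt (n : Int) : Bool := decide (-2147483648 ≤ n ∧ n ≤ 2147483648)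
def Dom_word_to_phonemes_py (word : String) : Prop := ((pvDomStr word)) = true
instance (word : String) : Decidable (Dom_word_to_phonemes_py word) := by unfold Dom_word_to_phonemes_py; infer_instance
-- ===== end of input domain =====

-- B replaces A's index-driven while loop by one regex findall (digraph alternatives
-- first, then a single-letter class); objective: idiomatic, same cost.

def pvVowels : List Char := ['a', 'e', 'i', 'o', 'u']
def pvConsonants : List Char :=
  ['b', 'c', 'd', 'f', 'g', 'h', 'j', 'k', 'l', 'm', 'n', 'p', 'q', 'r', 's', 't', 'v', 'w', 'x', 'y', 'z']
def pvDigraphs : List (List Char) := [['c', 'h'], ['n', 'g'], ['n', 'y'], ['t', 'h']]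

-- ===== PORT A =====
-- A's while loop: index i over the lowercased word, appending to `phonemes`;
-- recursion on the fuel word.length - i; strings handled as their char lists.
def wtpLoop (w : List Char) (phonemes : List String) (i : Nat) : List String :=
  if _h : i < w.length then
    if i < w.length - 1 ∧ (w.drop i).take 2 ∈ pvDigraphs then
      -- digraph branch with `continue`
      wtpLoop w (phonemes ++ [String.ofList ((w.drop i).take 2)]) (i + 2)
    else
      let c := w.getD i ' '   -- word[i]; i < len(word) holds here
      if c ∈ pvVowels then
        wtpLoop w (phonemes ++ [String.ofList [c]]) (i + 1)
      else if c ∈ pvConsonants then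
        wtpLoop w (phonemes ++ [String.ofList [c]]) (i + 1)
      else
        wtpLoop w phonemes (i + 1)
  else phonemes
termination_by w.length - i
decreasing_by all_goals omega

def word_to_phonemes_py (word : String) : List String :=
  wtpLoop (PySem.Str.lower word).toList [] 0

-- ===== PORT B =====
-- re.findall(r'ch|ng|ny|th|[a-z]', word.lower()): at each position the engine
-- tries the alternatives in order (the four two-char literals, then the class
-- [a-z] = any lowercase letter), otherwise moves on one character.
def pvAlphabet : List Char :=
  ['a', 'b', 'c', 'd', 'e', 'f', 'g', 'h', 'i', 'j', 'k', 'l', 'm',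
   'n', 'o', 'p', 'q', 'r', 's', 't', 'u', 'v', 'w', 'x', 'y', 'z']

def pvFindAll : List Char → List String
  | [] => []
  | [c] => if c ∈ pvAlphabet then [String.ofList [c]] else []
  | c1 :: c2 :: rest =>
    if [c1, c2] ∈ pvDigraphs then
      String.ofList [c1, c2] :: pvFindAll rest
    else if c1 ∈ pvAlphabet then
      String.ofList [c1] :: pvFindAll (c2 :: rest)
    else
      pvFindAll (c2 :: rest)
termination_by cs => cs.length
decreasing_by all_goals (simp only [List.length_cons]; omega)

def word_to_phonemes_py_alt (word : String) : List String :=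
  pvFindAll (PySem.Str.lower word).toList

-- ===== PRECONDITION & SPEC =====
def Spec_word_to_phonemes_py (word : String) (out : List String) : Prop := out = word_to_phonemes_py_alt word
instance (word : String) (out : List String) : Decidable (Spec_word_to_phonemes_py word out) := by unfold Spec_word_to_phonemes_py; infer_instance

-- ===== CLAIM (what is proved, stated in full; the proofs are below) =====
def Claim_equal_word_to_phonemes_py : Prop := ∀ (word : String), Dom_word_to_phonemes_py word → Spec_word_to_phonemes_py word (word_to_phonemes_py word)

-- ===== LEMMAS AND PROOFS =====

-- A's vowel-or-consonant membership is exactly B's letter class [a-z].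
theorem pv_letter_class (c : Char) :
    (c ∈ pvVowels ∨ c ∈ pvConsonants) ↔ c ∈ pvAlphabet := by
  rw [← List.mem_append]
  exact List.Perm.mem_iff (by decide : (pvVowels ++ pvConsonants).Perm pvAlphabet)

theorem wtpLoop_eq (w : List Char) (i : Nat) (phonemes : List String) :
    wtpLoop w phonemes i = phonemes ++ pvFindAll (w.drop i) := by
  rw [wtpLoop]
  by_cases hi : i < w.length
  · have hdrop : w.drop i = w[i] :: w.drop (i + 1) := List.drop_eq_getElem_cons hi
    have hc : w.getD i ' ' = w[i] := List.getD_eq_getElem w ' ' hi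
    by_cases h2 : i < w.length - 1
    · have hi1 : i + 1 < w.length := by omega
      have hdrop1 : w.drop (i + 1) = w[i + 1] :: w.drop (i + 2) := List.drop_eq_getElem_cons hi1
      have htake : (w.drop i).take 2 = [w[i], w[i + 1]] := by
        rw [hdrop, hdrop1]; rfl
      by_cases hd : (w.drop i).take 2 ∈ pvDigraphs
      · simp only [hi, h2, hd, and_self, if_true, dif_pos]
        rw [wtpLoop_eq w (i + 2)]
        rw [hdrop, hdrop1, htake] at *
        simp only [pvFindAll, if_pos hd]
        simp
      · simp only [hi, h2, hd, and_false, if_false, dif_pos]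
        rw [htake] at hd
        rw [hc, hdrop, hdrop1]
        simp only [pvFindAll, if_neg hd]
        by_cases hv : w[i] ∈ pvVowels
        · have hl : w[i] ∈ pvAlphabet := (pv_letter_class _).mp (Or.inl hv)
          rw [if_pos hv, wtpLoop_eq w (i + 1), if_pos hl, hdrop1]; simp
        · rw [if_neg hv]
          by_cases hk : w[i] ∈ pvConsonants
          · have hl : w[i] ∈ pvAlphabet := (pv_letter_class _).mp (Or.inr hk)
            rw [if_pos hk, wtpLoop_eq w (i + 1), if_pos hl, hdrop1]; simp
          · have hl : w[i] ∉ pvAlphabet := by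
              intro h; rcases (pv_letter_class _).mpr h with h | h <;> [exact hv h; exact hk h]
            rw [if_neg hk, wtpLoop_eq w (i + 1), if_neg hl, hdrop1]
    · -- last character: drop i = [w[i]]
      have hnil : w.drop (i + 1) = [] := List.drop_eq_nil_of_le (by omega)
      have hone : w.drop i = [w[i]] := by rw [hdrop, hnil]
      simp only [hi, h2, false_and, if_false, dif_pos]
      rw [hc, hone]
      simp only [pvFindAll]
      by_cases hv : w[i] ∈ pvVowels
      · have hl : w[i] ∈ pvAlphabet := (pv_letter_class _).mp (Or.inl hv)
        rw [if_pos hv, wtpLoop_eq w (i + 1), if_pos hl, hnil]; simp [pvFindAll]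
      · rw [if_neg hv]
        by_cases hk : w[i] ∈ pvConsonants
        · have hl : w[i] ∈ pvAlphabet := (pv_letter_class _).mp (Or.inr hk)
          rw [if_pos hk, wtpLoop_eq w (i + 1), if_pos hl, hnil]; simp [pvFindAll]
        · have hl : w[i] ∉ pvAlphabet := by
            intro h; rcases (pv_letter_class _).mpr h with h | h <;> [exact hv h; exact hk h]
          rw [if_neg hk, wtpLoop_eq w (i + 1), if_neg hl, hnil]; simp [pvFindAll]
  · have hnil : w.drop i = [] := List.drop_eq_nil_of_le (by omega)
    rw [dif_neg hi, hnil]; simp [pvFindAll]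
termination_by w.length - i
decreasing_by all_goals omega

-- ===== VERDICT (by name: the statement is the Claim_ definition above) =====
theorem word_to_phonemes_py_spec : Claim_equal_word_to_phonemes_py := by
  intro word _
  show word_to_phonemes_py word = word_to_phonemes_py_alt word
  unfold word_to_phonemes_py word_to_phonemes_py_alt
  rw [wtpLoop_eq]
  simp
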